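-- pv_equiv track=rewrite | github.com/Tanjim-Noor/Mindrift | Sponsorship Strategy CSV/enrichment_script.py | estimate_potential_value
-- ===== SOURCE A (Python) =====
-- def estimate_potential_value(category, role, company_scale):
--     """
--     Estimates potential value: $, $$, $$$
--     """
--     role_lower = role.lower()
--
--     is_high_level = any(x in role_lower for x in ["ceo", "founder", "president", "chief", "head", "director", "vp"])
--     is_global = company_scale == "Global"
--
--     if category == "Category A: Jazzylea Festival Sponsor":
--         if is_global and is_high_level:
--             return "$$$"
--         elif is_global or is_high_level:
--             return "$$"
--         else:
--             return "$"
--     else: # Category B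
--         if is_high_level and is_global: # Major venue or promoter
--             return "$$$"
--         elif is_high_level or is_global:
--             return "$$"
--         else:
--             return "$"
-- ===== SOURCE B (Python) =====
-- def estimate_potential_value(category, role, company_scale):
--     """
--     Estimates potential value: $, $$, $$$
--     """
--     role_lower = role.lower()
--     keywords = ("ceo", "founder", "president", "chief", "head", "director", "vp")
--     dollars = 1
--     for i in range(len(role_lower)):
--         if role_lower.startswith(keywords, i):
--             dollars += 1
--             break
--     if company_scale == "Global":
--         dollars += 1
--     return "$" * dollars
-- ===== Notes on version B (the rewrite author's own statement) =====
-- stated objective: alternative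
-- what changed: Instead of testing each keyword with a separate 'in' substring search and branching on a category/flag if-elif cascade, B makes one left-to-right sweep over the role positions testing tuple-startswith at each index (breaking on the first hit), accumulates a dollar count, and builds the result by string repetition '$' * dollars.
import Mathlib
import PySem

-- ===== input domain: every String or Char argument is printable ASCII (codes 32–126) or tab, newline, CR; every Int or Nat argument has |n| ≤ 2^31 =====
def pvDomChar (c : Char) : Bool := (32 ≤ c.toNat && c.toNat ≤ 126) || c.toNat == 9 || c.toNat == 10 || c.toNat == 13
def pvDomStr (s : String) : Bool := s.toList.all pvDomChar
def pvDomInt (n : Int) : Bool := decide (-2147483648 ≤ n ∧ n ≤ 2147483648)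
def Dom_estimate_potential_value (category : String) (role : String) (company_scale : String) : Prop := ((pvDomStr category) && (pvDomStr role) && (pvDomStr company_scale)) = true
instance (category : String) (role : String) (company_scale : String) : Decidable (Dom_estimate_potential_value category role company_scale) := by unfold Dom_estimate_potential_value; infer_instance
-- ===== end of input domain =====

-- B replaces the per-keyword 'in' searches and the category/flag if-elif cascade by a single
-- left-to-right sweep over role positions (tuple-startswith, break on first hit), a dollar counter,
-- and string repetition (objective: alternative).

-- ===== PORT A =====
def estimate_potential_value (category : String) (role : String) (company_scale : String) : String :=
  let role_lower := PySem.Str.lower role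
  let is_high_level := ["ceo", "founder", "president", "chief", "head", "director", "vp"].any
    (fun x => PySem.Str.isIn x role_lower)
  let is_global := company_scale == "Global"
  if category == "Category A: Jazzylea Festival Sponsor" then
    if is_global && is_high_level then "$$$"
    else if is_global || is_high_level then "$$"
    else "$"
  else
    if is_high_level && is_global then "$$$"
    else if is_high_level || is_global then "$$"
    else "$"

-- ===== PORT B =====
-- Source B's position loop 'for i in range(len(role_lower)): if role_lower.startswith(keywords, i): … break'
-- as structural recursion over the suffixes of the char list (startswith(t, i) = some keyword is a
-- prefix of the suffix at i; 'break' = stop at the first hit).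
def pvScanB (kws : List (List Char)) : List Char → Bool
  | [] => false
  | c :: rest => if kws.any (fun k => k.isPrefixOf (c :: rest)) then true else pvScanB kws rest

def estimate_potential_value_alt (category : String) (role : String) (company_scale : String) : String :=
  let role_lower := PySem.Str.lower role
  let keywords := ["ceo", "founder", "president", "chief", "head", "director", "vp"]
  let dollars : Nat := if pvScanB (keywords.map String.toList) role_lower.toList then 2 else 1
  let dollars := if company_scale == "Global" then dollars + 1 else dollars
  String.ofList (List.replicate dollars '$')

-- ===== PRECONDITION & SPEC =====
def Spec_estimate_potential_value (category : String) (role : String) (company_scale : String) (out : String) : Prop := out = estimate_potential_value_alt category role company_scale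
instance (category : String) (role : String) (company_scale : String) (out : String) : Decidable (Spec_estimate_potential_value category role company_scale out) := by unfold Spec_estimate_potential_value; infer_instance

-- ===== CLAIM (what is proved, stated in full; the proofs are below) =====
def Claim_equal_estimate_potential_value : Prop := ∀ (category : String) (role : String) (company_scale : String), Dom_estimate_potential_value category role company_scale → Spec_estimate_potential_value category role company_scale (estimate_potential_value category role company_scale)

-- ===== LEMMAS AND PROOFS =====

-- pvScanB finds a hit iff some (nonempty) keyword is an infix of the char list.
theorem pvScanB_iff (kws : List (List Char)) (h : ∀ k ∈ kws, k ≠ []) (cs : List Char) :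
    pvScanB kws cs = true ↔ ∃ k ∈ kws, k <:+: cs := by
  induction cs with
  | nil =>
    simp only [pvScanB, Bool.false_eq_true, false_iff]
    rintro ⟨k, hk, hinf⟩
    exact h k hk (List.eq_nil_of_infix_nil hinf)
  | cons c rest ih =>
    simp only [pvScanB]
    split_ifs with hany
    · simp only [true_iff]
      rcases List.any_eq_true.mp hany with ⟨k, hk, hp⟩
      exact ⟨k, hk, (List.isPrefixOf_iff_prefix.mp hp).isInfix⟩
    · simp only [ih]
      constructor
      · rintro ⟨k, hk, hinf⟩; exact ⟨k, hk, List.infix_cons_iff.mpr (Or.inr hinf)⟩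
      · rintro ⟨k, hk, hinf⟩
        rcases List.infix_cons_iff.mp hinf with hpre | hinf'
        · simp only [List.any_eq_true, List.isPrefixOf_iff_prefix] at hany
          exact absurd ⟨k, hk, hpre⟩ hany
        · exact ⟨k, hk, hinf'⟩

-- A's keyword test and B's sweep agree.
theorem scan_eq_any (s : String) :
    pvScanB (["ceo", "founder", "president", "chief", "head", "director", "vp"].map String.toList)
      s.toList
    = ["ceo", "founder", "president", "chief", "head", "director", "vp"].any
      (fun x => PySem.Str.isIn x s) := by
  rw [Bool.eq_iff_iff, pvScanB_iff _ (by decide), List.any_eq_true]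
  constructor
  · rintro ⟨k, hk, hinf⟩
    rcases List.mem_map.mp hk with ⟨x, hx, rfl⟩
    exact ⟨x, hx, by rw [PySem.Str.isIn_eq]; exact (PySem.Chars.isIn_iff_infix _ _).mpr hinf⟩
  · rintro ⟨x, hx, hin⟩
    exact ⟨x.toList, List.mem_map.mpr ⟨x, hx, rfl⟩, (PySem.Chars.isIn_iff_infix _ _).mp ((PySem.Str.isIn_eq x s) ▸ hin)⟩

-- ===== VERDICT (by name: the statement is the Claim_ definition above) =====
theorem estimate_potential_value_spec : Claim_equal_estimate_potential_value := by
  intro category role company_scale _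
  unfold Spec_estimate_potential_value estimate_potential_value estimate_potential_value_alt
  dsimp only
  rw [scan_eq_any (PySem.Str.lower role)]
  cases h1 : (["ceo", "founder", "president", "chief", "head", "director", "vp"].any
      (fun x => PySem.Str.isIn x (PySem.Str.lower role))) <;>
    cases h2 : (company_scale == "Global") <;>
    cases h3 : (category == "Category A: Jazzylea Festival Sponsor") <;>
    simp [List.replicate]
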